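-- pv_equiv track=rewrite | github.com/RoryLi98/Unmanned-Boat-Online-Verification-System | OfflineVersion/main.py | split_into_parts
-- ===== SOURCE A (Python) =====
-- def split_into_parts(number, n):
--     if n <= 0:
--         return []
--
--     quotient = number // n
--     remainder = number % n
--
--     parts = []
--     start_index = 0
--
--     for i in range(n):
--         end_index = start_index + quotient + (1 if i < remainder else 0)
--         parts.append(end_index - 1)
--         start_index = end_index
--
--     return parts
-- ===== SOURCE B (Python) =====
-- def split_into_parts(number, n):
--     if n <= 0:
--         return []
--     quotient, remainder = divmod(number, n)
--     # closed form: part i ends at (i+1)*quotient + min(i+1, remainder) - 1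
--     return [(i + 1) * quotient + min(i + 1, remainder) - 1 for i in range(n)]
-- ===== Notes on version B (the rewrite author's own statement) =====
-- stated objective: simpler
-- what changed: Replaces the stateful loop carrying a running start_index with a direct closed-form expression per part ((i+1)*quotient + min(i+1, remainder) - 1), returned as a stateless comprehension.
import Mathlib
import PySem

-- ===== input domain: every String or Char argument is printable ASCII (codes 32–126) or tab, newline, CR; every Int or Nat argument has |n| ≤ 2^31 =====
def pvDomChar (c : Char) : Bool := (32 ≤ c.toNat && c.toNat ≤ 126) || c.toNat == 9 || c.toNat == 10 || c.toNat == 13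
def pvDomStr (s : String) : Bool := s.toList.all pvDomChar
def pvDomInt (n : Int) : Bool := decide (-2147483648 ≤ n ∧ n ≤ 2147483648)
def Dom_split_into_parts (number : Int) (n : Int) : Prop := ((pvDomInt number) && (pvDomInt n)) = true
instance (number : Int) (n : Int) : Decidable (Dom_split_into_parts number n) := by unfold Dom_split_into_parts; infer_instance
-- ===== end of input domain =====

-- B drops A's running start_index accumulator and computes each end index by a closed form (objective: simpler).

-- ===== PORT A =====
def split_into_parts (number : Int) (n : Int) : List Int :=
  if n ≤ 0 then []
  else
    let quotient := PySem.Int.floordiv number n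
    let remainder := PySem.Int.mod number n
    let st := (PySem.List.pyRange 0 n 1).foldl
      (fun (st : List Int × Int) i =>
        let end_index := st.2 + quotient + (if i < remainder then 1 else 0)
        (st.1 ++ [end_index - 1], end_index))
      ([], 0)
    st.1

-- ===== PORT B =====
def split_into_parts_alt (number : Int) (n : Int) : List Int :=
  if n ≤ 0 then []
  else
    let quotient := PySem.Int.floordiv number n
    let remainder := PySem.Int.mod number n
    (PySem.List.pyRange 0 n 1).map
      (fun i => (i + 1) * quotient + min (i + 1) remainder - 1)

-- ===== PRECONDITION & SPEC =====
def Spec_split_into_parts (number : Int) (n : Int) (out : List Int) : Prop := out = split_into_parts_alt number n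
instance (number : Int) (n : Int) (out : List Int) : Decidable (Spec_split_into_parts number n out) := by unfold Spec_split_into_parts; infer_instance

-- ===== CLAIM (what is proved, stated in full; the proofs are below) =====
def Claim_equal_split_into_parts : Prop := ∀ (number : Int) (n : Int), Dom_split_into_parts number n → Spec_split_into_parts number n (split_into_parts number n)

-- ===== LEMMAS AND PROOFS =====

-- Loop invariant: starting the fold at index a with start_index = a*q + min a r
-- produces exactly the closed-form values for indices a, a+1, …
theorem split_loop_inv (q r : Int) : ∀ (k : Nat) (a : Int) (acc : List Int),
    ((PySem.List.pyRange a (a + k) 1).foldl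
      (fun (st : List Int × Int) i =>
        let end_index := st.2 + q + (if i < r then 1 else 0)
        (st.1 ++ [end_index - 1], end_index))
      (acc, a * q + min a r))
    = (acc ++ (PySem.List.pyRange a (a + k) 1).map
        (fun i => (i + 1) * q + min (i + 1) r - 1),
       (a + k) * q + min (a + k) r) := by
  intro k
  induction k with
  | zero =>
    intro a acc
    simp [PySem.List.pyRange_one_eq_nil]
  | succ k ih =>
    intro a acc
    rw [PySem.List.pyRange_one_cons (by push_cast; omega : a < a + ((k+1:Nat) : Int))]
    simp only [List.foldl_cons, List.map_cons]
    have hstep : a * q + min a r + q + (if a < r then 1 else 0)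
        = (a + 1) * q + min (a + 1) r := by
      by_cases h : a < r <;> simp [h] <;> [skip; skip] <;> ring_nf <;> omega
    have harg : a + ((k+1:Nat) : Int) = (a + 1) + (k : Int) := by push_cast; ring
    rw [harg]
    have := ih (a + 1) (acc ++ [a * q + min a r + q + (if a < r then 1 else 0) - 1])
    simp only [hstep] at this ⊢
    rw [this]
    simp

theorem split_into_parts_eq (number n : Int) :
    split_into_parts number n = split_into_parts_alt number n := by
  unfold split_into_parts split_into_parts_alt
  by_cases h : n ≤ 0
  · simp [h]
  · simp only [h, if_false]
    have hr : 0 ≤ PySem.Int.mod number n := by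
      rw [PySem.Int.mod_eq_emod_of_pos (by omega)]
      exact Int.emod_nonneg number (by omega)
    have key := split_loop_inv (PySem.Int.floordiv number n) (PySem.Int.mod number n) n.toNat 0 []
    rw [show (0 : Int) + (n.toNat : Int) = n by omega,
        show (0 : Int) * (PySem.Int.floordiv number n) + min 0 (PySem.Int.mod number n) = 0 by
          simp [min_eq_left hr]] at key
    have := congrArg Prod.fst key
    simpa using this

-- ===== VERDICT (by name: the statement is the Claim_ definition above) =====
theorem split_into_parts_spec : Claim_equal_split_into_parts := by
  intro number n _
  exact split_into_parts_eq number n
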